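-- pv_equiv track=rewrite | github.com/adamsafril19/Customer-Analitycs--Mamina- | backend/app/services/etl_service.py | _group_by_sender
-- ===== SOURCE A (Python) =====
-- from typing import Dict, Any, List, Optional, Tuple
--
-- def _group_by_sender(
--
--     messages: List[Dict[str, Any]]
-- ) -> Dict[str, List[Dict[str, Any]]]:
--     """Group messages by sender (excluding admin)"""
--     grouped = {}
--
--     for msg in messages:
--         if msg["direction"] == "inbound":
--             sender = msg["sender"]
--             if sender not in grouped:
--                 grouped[sender] = []
--             grouped[sender].append(msg)
--
--     return grouped
-- ===== SOURCE B (Python) =====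
-- from typing import Dict, Any, List
--
--
-- def _group_by_sender(
--     messages: List[Dict[str, Any]]
-- ) -> Dict[str, List[Dict[str, Any]]]:
--     """Group inbound messages by sender: ordered distinct senders, then one filter pass per sender."""
--     inbound = [m for m in messages if m["direction"] == "inbound"]
--     senders = []
--     for m in inbound:
--         s = m["sender"]
--         if s not in senders:
--             senders.append(s)
--     return {s: [m for m in inbound if m["sender"] == s] for s in senders}
-- ===== Notes on version B (the rewrite author's own statement) =====
-- stated objective: alternative
-- what changed: A accumulates into a dict in one pass with per-message membership tests and in-place appends; B first filters the inbound messages, computes the ordered list of distinct senders, and then builds each group by a separate filter pass per sender (dict comprehension), with no mutable dict accumulation.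
import Mathlib
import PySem

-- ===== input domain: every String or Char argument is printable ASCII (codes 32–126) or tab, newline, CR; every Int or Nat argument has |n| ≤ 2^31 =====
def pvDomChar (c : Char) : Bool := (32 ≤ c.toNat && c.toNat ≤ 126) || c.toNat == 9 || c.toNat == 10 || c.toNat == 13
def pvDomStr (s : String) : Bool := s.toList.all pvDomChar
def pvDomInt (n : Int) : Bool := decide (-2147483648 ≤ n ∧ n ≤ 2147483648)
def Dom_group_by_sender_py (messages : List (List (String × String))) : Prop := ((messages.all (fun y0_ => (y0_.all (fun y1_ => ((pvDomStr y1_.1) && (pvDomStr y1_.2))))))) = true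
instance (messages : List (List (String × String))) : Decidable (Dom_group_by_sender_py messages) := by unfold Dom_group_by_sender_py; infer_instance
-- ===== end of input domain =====

-- B replaces A's one-pass dict accumulation by filter-inbound, ordered distinct senders, then one filter pass per sender; alternative decomposition, not faster.


-- msg["k"] on a message given as an association list: first match, none = KeyError
def pvLookup (m : List (String × String)) (k : String) : Option String :=
  (PySem.Dict.mk m).get? k

-- ===== PORT A =====
def group_by_sender_py (messages : List (List (String × String))) : List (String × List (List (String × String))) :=
  (messages.foldl
    (fun grouped msg =>
      if pvLookup msg "direction" = some "inbound" then
        match pvLookup msg "sender" with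
        | some sender =>
            (if grouped.contains sender then grouped
             else grouped.insert sender ([] : List (List (String × String)))).modify
              sender [] (fun l => l ++ [msg])
        | none => grouped        -- KeyError in Python: excluded by Pre_
      else grouped)
    PySem.Dict.empty).items

-- ===== PORT B =====
def group_by_sender_py_alt (messages : List (List (String × String))) : List (String × List (List (String × String))) :=
  let inbound := messages.filter (fun m => pvLookup m "direction" == some "inbound")
  let senders := inbound.foldl
    (fun acc m =>
      match pvLookup m "sender" with
      | some s => if s ∈ acc then acc else acc ++ [s]
      | none => acc)             -- KeyError in Python: excluded by Pre_
    []
  senders.map (fun s => (s, inbound.filter (fun m => pvLookup m "sender" == some s)))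

-- ===== PRECONDITION & SPEC =====
-- Pre_ excludes exactly the inputs where Python raises KeyError: a message without a
-- "direction" key, or an inbound message without a "sender" key.
def Pre_group_by_sender_py (messages : List (List (String × String))) : Prop :=
  ∀ m ∈ messages, (pvLookup m "direction").isSome = true ∧
    (pvLookup m "direction" = some "inbound" → (pvLookup m "sender").isSome = true)
instance (messages : List (List (String × String))) : Decidable (Pre_group_by_sender_py messages) := by
  unfold Pre_group_by_sender_py; infer_instance

def pvWitness_group_by_sender_py : (List (List (String × String))) :=
  [[("direction", "inbound"), ("sender", "alice"), ("text", "hi")],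
   [("direction", "outbound"), ("text", "yo")],
   [("direction", "inbound"), ("sender", "bob")],
   [("direction", "inbound"), ("sender", "alice"), ("text", "again")]]

def Spec_group_by_sender_py (messages : List (List (String × String))) (out : List (String × List (List (String × String)))) : Prop := out = group_by_sender_py_alt messages
instance (messages : List (List (String × String))) (out : List (String × List (List (String × String)))) : Decidable (Spec_group_by_sender_py messages out) := by unfold Spec_group_by_sender_py; infer_instance

-- ===== CLAIM (what is proved, stated in full; the proofs are below) =====
def Claim_equal_group_by_sender_py : Prop := ∀ (messages : List (List (String × String))), Dom_group_by_sender_py messages → Pre_group_by_sender_py messages → Spec_group_by_sender_py messages (group_by_sender_py messages)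

-- ===== LEMMAS AND PROOFS =====

-- sender of a message (proof-side; = the value Python reads when the key is present)
def pvSender (m : List (String × String)) : String :=
  (pvLookup m "sender").getD ""

-- A's accumulation step equals a plain dict 'modify' with append.
theorem stepA_eq_modify (d : PySem.Dict String (List (List (String × String))))
    (s : String) (msg : List (String × String)) :
    (if d.contains s then d else d.insert s ([] : List (List (String × String)))).modify
      s [] (fun l => l ++ [msg]) = d.modify s [] (fun l => l ++ [msg]) := by
  by_cases h : d.contains s = true
  · simp [h]
  · have h' : d.contains s = false := by simpa using h
    simp [PySem.Dict.modify, PySem.Dict.getD_insert_self,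
      PySem.Dict.getD_of_not_contains _ _ h', PySem.Dict.insert_insert_self, h']

-- A's fold over all messages is the modify-fold over the (sender, msg) pairs of the inbound ones.
theorem A_fold_eq (messages : List (List (String × String)))
    (h : Pre_group_by_sender_py messages)
    (d : PySem.Dict String (List (List (String × String)))) :
    messages.foldl
      (fun grouped msg =>
        if pvLookup msg "direction" = some "inbound" then
          match pvLookup msg "sender" with
          | some sender =>
              (if grouped.contains sender then grouped
               else grouped.insert sender ([] : List (List (String × String)))).modify
                sender [] (fun l => l ++ [msg])
          | none => grouped
        else grouped) d
    = ((messages.filter (fun m => pvLookup m "direction" == some "inbound")).map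
        (fun m => (pvSender m, m))).foldl
        (fun d p => d.modify p.1 [] (fun l => l ++ [p.2])) d := by
  induction messages generalizing d with
  | nil => rfl
  | cons m ms ih =>
    have hm := h m (by simp)
    have hms : Pre_group_by_sender_py ms := fun x hx => h x (by simp [hx])
    by_cases hin : pvLookup m "direction" = some "inbound"
    · obtain ⟨s, hs⟩ := Option.isSome_iff_exists.mp (hm.2 hin)
      have hsOf : pvSender m = s := by simp [pvSender, hs]
      simp only [List.foldl_cons, List.filter_cons, hin, beq_self_eq_true, if_pos, List.map_cons,
        hs, hsOf]
      rw [stepA_eq_modify]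
      exact ih hms _
    · simp only [List.foldl_cons, List.filter_cons, if_neg hin]
      have : (pvLookup m "direction" == some "inbound") = false := by
        simpa using hin
      simp only [this, Bool.false_eq_true, if_neg, not_false_iff]
      exact ih hms _

-- B's sender-collection fold is PySem.Set.update of the mapped senders.
theorem B_senders_eq (inbound : List (List (String × String)))
    (h : ∀ m ∈ inbound, (pvLookup m "sender").isSome = true)
    (acc : List String) :
    inbound.foldl
      (fun acc m =>
        match pvLookup m "sender" with
        | some s => if s ∈ acc then acc else acc ++ [s]
        | none => acc) acc
    = PySem.Set.update acc (inbound.map pvSender) := by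
  induction inbound generalizing acc with
  | nil => rfl
  | cons m ms ih =>
    obtain ⟨s, hs⟩ := Option.isSome_iff_exists.mp (h m (by simp))
    have hsOf : pvSender m = s := by simp [pvSender, hs]
    have hstep : (if s ∈ acc then acc else acc ++ [s]) = PySem.Set.add acc s := by
      simp [PySem.Set.add]
    simp only [List.foldl_cons, hs, List.map_cons, PySem.Set.update, hsOf, ← hstep]
    exact ih (fun x hx => h x (by simp [hx])) _

theorem group_by_sender_eq (messages : List (List (String × String)))
    (h : Pre_group_by_sender_py messages) :
    group_by_sender_py messages = group_by_sender_py_alt messages := by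
  unfold group_by_sender_py group_by_sender_py_alt
  dsimp only
  set inbound := messages.filter (fun m => pvLookup m "direction" == some "inbound") with hinb
  have hinPre : ∀ m ∈ inbound, (pvLookup m "sender").isSome = true := by
    intro m hm
    rw [hinb, List.mem_filter] at hm
    exact (h m hm.1).2 (by simpa using hm.2)
  rw [A_fold_eq messages h, B_senders_eq inbound hinPre]
  set l := inbound.map (fun m => (pvSender m, m)) with hl
  have hnodup : (l.foldl (fun d p => d.modify p.1 [] (fun v => v ++ [p.2]))
      PySem.Dict.empty).keys.Nodup := by
    have := PySem.Dict.nodup_keys_foldl_modify_key l (fun p => p.1) []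
      (fun _ p v => v ++ [p.2]) PySem.Dict.empty (by simp [PySem.Dict.keys_empty])
    simpa using this
  rw [PySem.Dict.items_eq_map_keys _ hnodup []]
  have hkeys : (l.foldl (fun d p => d.modify p.1 [] (fun v => v ++ [p.2]))
      PySem.Dict.empty).keys = PySem.Set.update [] (inbound.map pvSender) := by
    have := PySem.Dict.keys_foldl_modify_key l (fun p => p.1) []
      (fun _ p v => v ++ [p.2]) PySem.Dict.empty
    simpa [hl, List.map_map, Function.comp] using this
  rw [hkeys]
  apply List.map_congr_left
  intro s hs
  refine Prod.ext rfl ?_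
  have hgetD := PySem.Dict.getD_foldl_modify_append l PySem.Dict.empty s
  simp only [PySem.Dict.getD_empty, List.nil_append] at hgetD
  show (l.foldl (fun d p => d.modify p.1 [] (fun v => v ++ [p.2]))
      PySem.Dict.empty).getD s [] = _
  rw [hgetD, hl]
  rw [List.filter_map, List.map_map]
  have : ∀ m ∈ inbound, ((fun p => p.1 == s) ∘ fun m => (pvSender m, m)) m
      = (pvLookup m "sender" == some s) := by
    intro m hm
    obtain ⟨t, ht⟩ := Option.isSome_iff_exists.mp (hinPre m hm)
    simp [Function.comp, pvSender, ht]
  rw [List.filter_congr this]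
  simp [Function.comp_def]

-- ===== VERDICT (by name: the statement is the Claim_ definition above) =====
theorem group_by_sender_py_spec : Claim_equal_group_by_sender_py := by
  intro messages _ hpre
  unfold Spec_group_by_sender_py
  exact group_by_sender_eq messages hpre
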